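-- pv_equiv track=rewrite | github.com/unJASON/crazyflie-lib-python | examples/SwarmRanging/DeadPeriod/PacketAnalysis.py | analysise_dead_period
-- ===== SOURCE A (Python) =====
-- def analysise_dead_period(dist):
--     dead_period_kv = {}
--     dead_period_list=[]
--     distance = dist['distance']
--     check = distance[0]
--     flag = 1
--     for idx, ele in enumerate(distance):
--         if idx == 0:
--             pass
--         else:
--             if ele == check:
--                 flag = flag + 1
--             else:
--                 if flag in dead_period_kv.keys():
--                     dead_period_kv[flag] += 1
--                 else:
--                     dead_period_kv[flag] = 1
--                 dead_period_list.append(flag)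
--                 check = ele
--                 flag = 1
--     return dead_period_kv,dead_period_list
-- ===== SOURCE B (Python) =====
-- def analysise_dead_period(dist):
--     distance = dist['distance']
--     # pass 1: lengths of all maximal runs of equal consecutive values
--     runs = []
--     rest = distance
--     while rest:
--         head = rest[0]
--         k = 1
--         while k < len(rest) and rest[k] == head:
--             k += 1
--         runs.append(k)
--         rest = rest[k:]
--     # the trailing (still open) run is never recorded
--     dead_period_list = runs[:-1]
--     # pass 2: histogram of the recorded run lengths
--     dead_period_kv = {}
--     for flag in dead_period_list:
--         dead_period_kv[flag] = dead_period_kv.get(flag, 0) + 1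
--     return dead_period_kv, dead_period_list
-- ===== Notes on version B (the rewrite author's own statement) =====
-- stated objective: alternative
-- what changed: Replaces A's single interleaved counting loop (dict and list updated together while scanning) by two separate passes: first split the list into run lengths by repeated run-prefix slicing, drop the open last run with runs[:-1], then build the histogram in a second loop over the finished run-length list.
import Mathlib
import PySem

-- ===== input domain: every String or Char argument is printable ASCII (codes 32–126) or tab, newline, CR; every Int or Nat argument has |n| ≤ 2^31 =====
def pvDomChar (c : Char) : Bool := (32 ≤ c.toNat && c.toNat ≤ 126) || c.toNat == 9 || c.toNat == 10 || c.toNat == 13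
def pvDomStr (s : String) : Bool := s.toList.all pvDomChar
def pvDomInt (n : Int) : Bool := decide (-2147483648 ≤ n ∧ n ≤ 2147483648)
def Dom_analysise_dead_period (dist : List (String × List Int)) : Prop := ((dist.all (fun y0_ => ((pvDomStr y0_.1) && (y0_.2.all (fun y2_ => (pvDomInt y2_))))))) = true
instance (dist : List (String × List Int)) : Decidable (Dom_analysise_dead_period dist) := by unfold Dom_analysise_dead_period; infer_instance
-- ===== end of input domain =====

-- B replaces A's single interleaved counting loop by two passes: run lengths by run-prefix
-- slicing (dropping the open last run), then a histogram over the finished list ('alternative').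

-- ===== PORT A =====
-- the for-loop over enumerate(distance): state (kv, list, check, flag), idx carried explicitly
def pvALoop (l : List Int) (idx : Int) (kv : PySem.Dict Int Int) (lst : List Int)
    (check flag : Int) : PySem.Dict Int Int × List Int × Int × Int :=
  match l with
  | [] => (kv, lst, check, flag)
  | ele :: r =>
    if idx = 0 then pvALoop r (idx + 1) kv lst check flag
    else if ele = check then pvALoop r (idx + 1) kv lst check (flag + 1)
    else
      let kv' := if kv.contains flag then kv.modify flag 0 (· + 1) else kv.insert flag 1
      pvALoop r (idx + 1) kv' (lst ++ [flag]) ele 1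

def analysise_dead_period (dist : List (String × List Int)) : (List (Int × Int)) × List Int :=
  match (PySem.Dict.mk dist).get? "distance" with
  | none => ([], [])              -- KeyError in Python; excluded by Pre_
  | some distance =>
    match PySem.List.pyGet? distance 0 with
    | none => ([], [])            -- IndexError in Python (empty distance); excluded by Pre_
    | some check =>
      let st := pvALoop distance 0 PySem.Dict.empty [] check 1
      (st.1.items, st.2.1)

-- ===== PORT B =====
-- inner while: k = 1; while k < len(rest) and rest[k] == head: k += 1
def pvRunPrefixLen (rest : List Int) (head : Int) (k : Nat) : Nat :=
  if k < rest.length ∧ rest.getD k 0 = head then pvRunPrefixLen rest head (k + 1) else k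
termination_by rest.length - k

theorem pvRunPrefixLen_ge (rest : List Int) (head : Int) (k : Nat) :
    k ≤ pvRunPrefixLen rest head k := by
  unfold pvRunPrefixLen
  split
  · exact le_trans (Nat.le_succ k) (pvRunPrefixLen_ge rest head (k + 1))
  · exact le_refl k
termination_by rest.length - k

-- outer while: split off one run length, recurse on rest[k:]
def pvRunsOf (rest : List Int) : List Int :=
  match rest with
  | [] => []
  | x :: t =>
    let k := pvRunPrefixLen (x :: t) x 1
    (k : Int) :: pvRunsOf ((x :: t).drop k)
termination_by rest.length
decreasing_by
  have h1 : 1 ≤ pvRunPrefixLen (x :: t) x 1 := pvRunPrefixLen_ge (x :: t) x 1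
  simp [List.length_drop]; omega

def analysise_dead_period_alt (dist : List (String × List Int)) : (List (Int × Int)) × List Int :=
  match (PySem.Dict.mk dist).get? "distance" with
  | none => ([], [])              -- KeyError in Python; excluded by Pre_
  | some distance =>
    let runs := pvRunsOf distance
    let deadList := PySem.List.slice runs none (some (-1))     -- runs[:-1]
    let kv := deadList.foldl (fun d f => d.insert f (d.getD f 0 + 1)) PySem.Dict.empty
    (kv.items, deadList)

-- ===== PRECONDITION & SPEC =====
-- Pre_ excludes exactly the inputs where A raises: a missing 'distance' key (KeyError)
-- and an empty 'distance' list (IndexError).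
def Pre_analysise_dead_period (dist : List (String × List Int)) : Prop :=
  ((PySem.Dict.mk dist).get? "distance").getD [] ≠ []
instance (dist : List (String × List Int)) : Decidable (Pre_analysise_dead_period dist) := by
  unfold Pre_analysise_dead_period; infer_instance

def pvWitness_analysise_dead_period : (List (String × List Int)) :=
  [("distance", [3, 3, 5, 5, 5, 2])]

def Spec_analysise_dead_period (dist : List (String × List Int)) (out : (List (Int × Int)) × List Int) : Prop := out = analysise_dead_period_alt dist
instance (dist : List (String × List Int)) (out : (List (Int × Int)) × List Int) : Decidable (Spec_analysise_dead_period dist out) := by unfold Spec_analysise_dead_period; infer_instance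

-- ===== CLAIM (what is proved, stated in full; the proofs are below) =====
def Claim_equal_analysise_dead_period : Prop := ∀ (dist : List (String × List Int)), Dom_analysise_dead_period dist → Pre_analysise_dead_period dist → Spec_analysise_dead_period dist (analysise_dead_period dist)

-- ===== LEMMAS AND PROOFS =====

-- length of the run of equal values at the head (proof-side spec)
def pvCP (v : Int) : List Int → Nat
  | [] => 0
  | y :: ys => if y = v then 1 + pvCP v ys else 0

-- run lengths of the whole list (proof-side spec)
def pvRL (l : List Int) : List Int :=
  match l with
  | [] => []
  | x :: xs => ((1 + pvCP x xs : Nat) : Int) :: pvRL (xs.drop (pvCP x xs))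
termination_by l.length
decreasing_by simp [List.length_drop]

theorem pvRL_nil : pvRL [] = [] := by unfold pvRL; rfl

theorem pvRL_cons (x : Int) (xs : List Int) :
    pvRL (x :: xs) = ((1 + pvCP x xs : Nat) : Int) :: pvRL (xs.drop (pvCP x xs)) := by
  conv_lhs => rw [pvRL.eq_def]

theorem pvRunsOf_nil : pvRunsOf [] = [] := by unfold pvRunsOf; rfl

theorem pvRunsOf_cons (x : Int) (t : List Int) :
    pvRunsOf (x :: t) = ((pvRunPrefixLen (x :: t) x 1 : Nat) : Int)
      :: pvRunsOf ((x :: t).drop (pvRunPrefixLen (x :: t) x 1)) := by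
  conv_lhs => rw [pvRunsOf.eq_def]

theorem pvRunPrefixLen_eq (rest : List Int) (head : Int) (k : Nat) :
    pvRunPrefixLen rest head k = k + pvCP head (rest.drop k) := by
  unfold pvRunPrefixLen
  split
  · rename_i h
    obtain ⟨hk, hv⟩ := h
    have hgd : rest.getD k 0 = rest[k] := by
      simp [List.getD_eq_getElem?_getD, List.getElem?_eq_getElem hk]
    rw [hgd] at hv
    rw [pvRunPrefixLen_eq rest head (k + 1)]
    rw [List.drop_eq_getElem_cons hk]
    simp [pvCP, hv]
    omega
  · rename_i h
    by_cases hk : k < rest.length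
    · have hgd : rest.getD k 0 = rest[k] := by
        simp [List.getD_eq_getElem?_getD, List.getElem?_eq_getElem hk]
      have hv : ¬ rest[k] = head := fun hv => h ⟨hk, by rw [hgd]; exact hv⟩
      rw [List.drop_eq_getElem_cons hk]
      simp [pvCP, hv]
    · rw [List.drop_eq_nil_of_le (by omega)]
      simp [pvCP]
termination_by rest.length - k

theorem pvRunsOf_eq (l : List Int) : pvRunsOf l = pvRL l := by
  match l with
  | [] => rw [pvRunsOf_nil, pvRL_nil]
  | x :: xs =>
    rw [pvRunsOf_cons, pvRL_cons]
    have hk : pvRunPrefixLen (x :: xs) x 1 = 1 + pvCP x xs := by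
      rw [pvRunPrefixLen_eq]; simp
    simp only [hk]
    have hdrop : (x :: xs).drop (1 + pvCP x xs) = xs.drop (pvCP x xs) := by
      simp [Nat.add_comm 1 (pvCP x xs)]
    rw [hdrop, pvRunsOf_eq (xs.drop (pvCP x xs))]
termination_by l.length
decreasing_by simp [List.length_drop]

-- the list part of A's loop, as a pure recursion
def pvATail : List Int → Int → Int → List Int
  | [], _, _ => []
  | e :: r, check, flag =>
    if e = check then pvATail r check (flag + 1) else flag :: pvATail r e 1

-- A's dict-update step is Python's d[k] = d.get(k,0)+1 / Counter step
theorem pvStep_eq (d : PySem.Dict Int Int) (k : Int) :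
    (if d.contains k then d.modify k 0 (· + 1) else d.insert k 1) = d.modify k 0 (· + 1) := by
  by_cases h : d.contains k
  · simp [h]
  · have h' : d.contains k = false := by simpa using h
    simp only [h', Bool.false_eq_true, if_false, PySem.Dict.modify,
      PySem.Dict.getD_of_not_contains d 0 h']
    norm_num

-- A's loop, once past index 0, produces pvATail on the list side and folds the Counter step on the dict side
theorem pvALoop_spec (l : List Int) : ∀ (idx : Int) (kv : PySem.Dict Int Int)
    (lst : List Int) (check flag : Int), 0 < idx →
    (pvALoop l idx kv lst check flag).1
        = (pvATail l check flag).foldl (fun d x => d.modify x 0 (· + 1)) kv ∧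
    (pvALoop l idx kv lst check flag).2.1 = lst ++ pvATail l check flag := by
  induction l with
  | nil => intro idx kv lst check flag hidx; simp [pvALoop, pvATail]
  | cons e r ih =>
    intro idx kv lst check flag hidx
    by_cases he : e = check
    · simp only [pvALoop, if_neg (by omega : ¬ idx = 0), if_pos he, pvATail]
      exact ih (idx + 1) kv lst check (flag + 1) (by omega)
    · simp only [pvALoop, if_neg (by omega : ¬ idx = 0), if_neg he, pvATail]
      rw [pvStep_eq]
      obtain ⟨h1, h2⟩ := ih (idx + 1) (kv.modify flag 0 (· + 1)) (lst ++ [flag]) e 1 (by omega)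
      refine ⟨by rw [h1]; simp [List.foldl], by rw [h2]; simp⟩

-- A's recorded list is all run lengths except the trailing one
theorem pvATail_eq (xs : List Int) : ∀ (check flag : Int),
    pvATail xs check flag =
      (((flag + (pvCP check xs : Int)) :: pvRL (xs.drop (pvCP check xs)))).dropLast := by
  induction xs with
  | nil => intro check flag; simp [pvATail, pvCP, pvRL_nil]
  | cons e r ih =>
    intro check flag
    by_cases he : e = check
    · subst he
      have hcp : pvCP e (e :: r) = 1 + pvCP e r := by simp [pvCP]
      have hdr : (e :: r).drop (1 + pvCP e r) = r.drop (pvCP e r) := by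
        simp [Nat.add_comm 1 (pvCP e r)]
      simp only [pvATail, hcp, hdr, ih e (flag + 1)]
      push_cast
      ring_nf
    · have hcp : pvCP check (e :: r) = 0 := by simp [pvCP, he]
      simp only [pvATail, if_neg he, hcp, List.drop_zero, Nat.cast_zero, add_zero,
        ih e 1, pvRL_cons]
      rw [List.dropLast_cons_of_ne_nil (List.cons_ne_nil _ _)]
      push_cast
      rfl

theorem pvATail_runs (c : Int) (rest : List Int) :
    pvATail rest c 1 = (pvRL (c :: rest)).dropLast := by
  rw [pvATail_eq, pvRL_cons]
  push_cast
  rfl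

-- ===== VERDICT (by name: the statement is the Claim_ definition above) =====
theorem analysise_dead_period_spec : Claim_equal_analysise_dead_period := by
  intro dist _ hpre
  unfold Spec_analysise_dead_period analysise_dead_period analysise_dead_period_alt
  unfold Pre_analysise_dead_period at hpre
  cases hg : (PySem.Dict.mk dist).get? "distance" with
  | none => simp [hg] at hpre
  | some distance =>
    rw [hg] at hpre
    simp only [Option.getD_some] at hpre
    match distance, hpre with
    | c :: rest, _ =>
      have hget : PySem.List.pyGet? (c :: rest) 0 = some c := by
        simp [PySem.List.pyGet?, PySem.List.pyIdx?]
      dsimp only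
      rw [hget]
      dsimp only
      -- A side
      obtain ⟨h1, h2⟩ := pvALoop_spec rest 1 PySem.Dict.empty [] c 1 (by omega)
      have hloop : pvALoop (c :: rest) 0 PySem.Dict.empty [] c 1
          = pvALoop rest 1 PySem.Dict.empty [] c 1 := by
        simp [pvALoop]
      rw [hloop, h1, h2]
      -- B side
      rw [pvRunsOf_eq, PySem.List.slice_to_neg_one]
      rw [PySem.Dict.foldl_insert_getD_add_one_eq_counter, PySem.Dict.counter_eq_foldl]
      simp only [List.nil_append]
      rw [pvATail_runs]
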